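-- pv_equiv track=rewrite | github.com/NECROMANCER4/spere | AI project 1/build/spere.py | append_and_after_every_2
-- ===== SOURCE A (Python) =====
-- def append_and_after_every_2(text, n=5):
--   """Adds a newline character after every n words in a given text.
--
--   Args:
--     text: The input text.
--     n: The number of words after which to add a newline.
--
--   Returns:
--     The modified text with newlines.
--   """
--
--   words = text.split()
--   new_text = []
--   for i, word in enumerate(words):
--     new_text.append(word)
--     if (i + 1) % n == 0:
--       new_text.append('\n')
--   return ' '.join(new_text)
-- ===== SOURCE B (Python) =====
-- def append_and_after_every_2(text, n=5):
--   """Adds a newline character after every n words in a given text."""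
--   words = text.split()
--   parts = []
--   for i in range(0, len(words), n):
--     chunk = words[i:i+n]
--     piece = ' '.join(chunk)
--     if len(chunk) == n:
--       piece += ' \n'
--     parts.append(piece)
--   return ' '.join(parts)
-- ===== Notes on version B (the rewrite author's own statement) =====
-- stated objective: alternative
-- what changed: A walks word-by-word with enumerate and a modulo test, appending a separate newline token to the flat token list; B steps over the word list chunk by chunk via range(0,len,n), joins each chunk and marks full chunks with the trailing newline, then joins the chunk strings.
-- outside the precondition, e.g. on append_and_after_every_2('a b', -2): A returns 'a b \n', B returns ''
import Mathlib
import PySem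

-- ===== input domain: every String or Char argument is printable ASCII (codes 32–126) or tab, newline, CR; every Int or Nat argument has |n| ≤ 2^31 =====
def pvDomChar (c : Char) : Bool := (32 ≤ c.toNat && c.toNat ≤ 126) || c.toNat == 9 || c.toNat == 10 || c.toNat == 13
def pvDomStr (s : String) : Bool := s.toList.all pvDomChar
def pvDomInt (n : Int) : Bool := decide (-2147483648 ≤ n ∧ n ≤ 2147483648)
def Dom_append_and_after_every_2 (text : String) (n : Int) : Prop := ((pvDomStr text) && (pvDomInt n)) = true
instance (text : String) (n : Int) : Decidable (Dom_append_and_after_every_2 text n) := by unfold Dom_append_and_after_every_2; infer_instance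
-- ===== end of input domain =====

-- B replaces A's enumerate+modulo word walk with chunked stepping over the word list (alternative decomposition, same cost).


-- ===== PORT A =====
def append_and_after_every_2 (text : String) (n : Int) : String :=
  let words := PySem.Str.split₀ text
  let new_text := (PySem.List.enumerate words).foldl
    (fun acc (p : Int × String) =>
      let acc := acc ++ [p.2]
      if PySem.Int.mod (p.1 + 1) n == 0 then acc ++ ["\n"] else acc) []
  PySem.Str.join " " new_text

-- ===== PORT B =====
def append_and_after_every_2_alt (text : String) (n : Int) : String :=
  let words := PySem.Str.split₀ text
  let parts := (PySem.List.pyRange 0 words.length n).foldl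
    (fun acc (i : Int) =>
      let chunk := PySem.List.slice words (some i) (some (i + n))
      let piece := PySem.Str.join " " chunk
      let piece := if (chunk.length : Int) == n then piece ++ " \n" else piece
      acc ++ [piece]) []
  PySem.Str.join " " parts

-- ===== PRECONDITION & SPEC =====
-- Pre_ excludes n = 0 (both programs raise: A ZeroDivisionError, B ValueError) and negative n on
-- texts that contain a word, a corner no caller would specify: there A's Python-modulo sign accident
-- groups by |n| while B's range stepping naturally produces no chunks, and neither value is the
-- specified one; negative n on whitespace-only texts stays admitted (both return the empty string).
def Pre_append_and_after_every_2 (text : String) (n : Int) : Prop :=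
  1 ≤ n ∨ (n ≠ 0 ∧ PySem.Str.split₀ text = [])
instance (text : String) (n : Int) : Decidable (Pre_append_and_after_every_2 text n) := by unfold Pre_append_and_after_every_2; infer_instance
def pvWitness_append_and_after_every_2 : String × Int := ("a b c", 2)
def Spec_append_and_after_every_2 (text : String) (n : Int) (out : String) : Prop := out = append_and_after_every_2_alt text n
instance (text : String) (n : Int) (out : String) : Decidable (Spec_append_and_after_every_2 text n out) := by unfold Spec_append_and_after_every_2; infer_instance

-- ===== CLAIM (what is proved, stated in full; the proofs are below) =====
def Claim_equal_append_and_after_every_2 : Prop := ∀ (text : String) (n : Int), Dom_append_and_after_every_2 text n → Pre_append_and_after_every_2 text n → Spec_append_and_after_every_2 text n (append_and_after_every_2 text n)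

-- ===== LEMMAS AND PROOFS =====

-- token list produced by A's loop body for one enumerated word
def pvTokFn (n : Int) (p : Int × String) : List String :=
  if PySem.Int.mod (p.1 + 1) n == 0 then [p.2, "\n"] else [p.2]

-- chunk string produced by B's loop body for one start index
def pvPiece (ws : List String) (n i : Int) : String :=
  let chunk := PySem.List.slice ws (some i) (some (i + n))
  let piece := PySem.Str.join " " chunk
  if (chunk.length : Int) == n then piece ++ " \n" else piece

lemma pvA_eq (text : String) (n : Int) :
    append_and_after_every_2 text n
      = PySem.Str.join " " ((PySem.List.enumerate (PySem.Str.split₀ text)).flatMap (pvTokFn n)) := by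
  have h : (fun (acc : List String) (p : Int × String) =>
        let acc := acc ++ [p.2]
        if PySem.Int.mod (p.1 + 1) n == 0 then acc ++ ["\n"] else acc)
      = fun acc p => acc ++ pvTokFn n p := by
    funext acc p
    simp only [pvTokFn]
    split <;> simp
  simp only [append_and_after_every_2]
  rw [h, PySem.List.foldl_append_eq_flatMap]
  simp

lemma pvB_eq (text : String) (n : Int) :
    append_and_after_every_2_alt text n
      = PySem.Str.join " "
          ((PySem.List.pyRange 0 (PySem.Str.split₀ text).length n).map (pvPiece (PySem.Str.split₀ text) n)) := by
  simp only [append_and_after_every_2_alt]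
  rw [show (fun (acc : List String) (i : Int) =>
        let chunk := PySem.List.slice (PySem.Str.split₀ text) (some i) (some (i + n))
        let piece := PySem.Str.join " " chunk
        let piece := if (chunk.length : Int) == n then piece ++ " \n" else piece
        acc ++ [piece])
      = fun acc i => acc ++ [pvPiece (PySem.Str.split₀ text) n i] from rfl,
     PySem.List.foldl_append_singleton_eq_map]
  simp

lemma pvJoin_singleton (sep x : String) : PySem.Str.join sep [x] = x := by
  simp [PySem.Str.join, PySem.Chars.join_singleton]

lemma pvJoin_cons (sep x : String) (ys : List String) (h : ys ≠ []) :
    PySem.Str.join sep (x :: ys) = x ++ sep ++ PySem.Str.join sep ys := by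
  cases ys with
  | nil => exact absurd rfl h
  | cons y r =>
      simp [PySem.Str.join, PySem.Chars.join_cons_cons, String.append_assoc]

lemma pvJoin_append (sep : String) (xs ys : List String) (hx : xs ≠ []) (hy : ys ≠ []) :
    PySem.Str.join sep (xs ++ ys) = PySem.Str.join sep xs ++ sep ++ PySem.Str.join sep ys := by
  induction xs with
  | nil => exact absurd rfl hx
  | cons x xs IH =>
      cases xs with
      | nil => simp [pvJoin_cons sep x ys hy, pvJoin_singleton]
      | cons x2 xs2 =>
          rw [List.cons_append, pvJoin_cons sep x ((x2 :: xs2) ++ ys) (by simp),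
              IH (by simp), pvJoin_cons sep x (x2 :: xs2) (by simp)]
          simp [String.append_assoc]

lemma pvMod (a : Int) (m : Nat) : PySem.Int.mod a ↑m = a % ↑m := by
  simp [PySem.Int.mod, Int.fmod_eq_emod]

lemma pvTok_shift (m : Nat) (xs : List String) : ∀ s : Int,
    (PySem.List.enumerate xs (s + ↑m)).flatMap (pvTokFn ↑m)
      = (PySem.List.enumerate xs s).flatMap (pvTokFn ↑m) := by
  induction xs with
  | nil => intro s; simp [PySem.List.enumerate_nil]
  | cons x xs IH =>
      intro s
      rw [PySem.List.enumerate_cons, PySem.List.enumerate_cons]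
      simp only [List.flatMap_cons]
      congr 1
      · simp only [pvTokFn, pvMod]
        rw [show s + ↑m + 1 = s + 1 + ↑m by ring, Int.add_emod_right]
      · rw [show s + ↑m + 1 = s + 1 + ↑m by ring]
        exact IH (s + 1)

lemma pvTok_chunk (m : Nat) (hm : 1 ≤ m) : ∀ (xs : List String) (s : Nat),
    s + xs.length ≤ m →
    (PySem.List.enumerate xs ↑s).flatMap (pvTokFn ↑m)
      = xs ++ (if xs ≠ [] ∧ s + xs.length = m then ["\n"] else []) := by
  intro xs
  induction xs with
  | nil => intro s _; simp [PySem.List.enumerate_nil]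
  | cons x xs IH =>
      intro s hs
      have hlen : s + 1 + xs.length ≤ m := by simp at hs; omega
      rw [PySem.List.enumerate_cons]
      simp only [List.flatMap_cons]
      have hmod : PySem.Int.mod ((s : Int) + 1) ↑m = (((s + 1) % m : Nat) : Int) := by
        rw [pvMod]; push_cast; ring
      by_cases h : s + 1 = m
      · have hxs : xs = [] := List.length_eq_zero_iff.mp (by simp at hs; omega)
        subst hxs
        simp only [pvTokFn, hmod, h, Nat.mod_self]
        simp [h]
      · have h1 : s + 1 < m := by simp at hs; omega
        simp only [pvTokFn, hmod]
        rw [if_neg (by simp only [beq_iff_eq, Nat.mod_eq_of_lt h1]; exact_mod_cast (by omega : ¬ (s + 1 : Nat) = 0))]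
        rw [show ((s : Int) + 1) = ((s + 1 : Nat) : Int) by push_cast; ring, IH (s + 1) hlen]
        have hiff : (xs ≠ [] ∧ s + 1 + xs.length = m) ↔ (x :: xs ≠ [] ∧ s + (x :: xs).length = m) := by
          rcases eq_or_ne xs [] with h0 | h0
          · subst h0; simp; omega
          · simp [h0]; omega
        rw [if_congr hiff.symm rfl rfl]
        simp

lemma pvTok_ne_nil (n : Int) (xs : List String) (hx : xs ≠ []) (s : Int) :
    (PySem.List.enumerate xs s).flatMap (pvTokFn n) ≠ [] := by
  cases xs with
  | nil => exact absurd rfl hx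
  | cons x xs =>
      rw [PySem.List.enumerate_cons]
      simp only [List.flatMap_cons, pvTokFn]
      split <;> simp

lemma pvRange_empty (n : Int) (h : n ≠ 0) : PySem.List.pyRange 0 0 n = [] := by
  unfold PySem.List.pyRange
  rcases lt_trichotomy n 0 with h1 | h1 | h1 <;> simp_all

lemma pvRange_nil (a b s : Int) (hs : 0 < s) (h : b ≤ a) : PySem.List.pyRange a b s = [] := by
  rw [PySem.List.pyRange_of_pos _ _ hs, if_neg (by omega)]
  simp

lemma pvRange_chunk (m len : Nat) (hm : 1 ≤ m) (hlen : 1 ≤ len) :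
    PySem.List.pyRange 0 (len : Int) ↑m
      = 0 :: (PySem.List.pyRange 0 ((len : Int) - ↑m) ↑m).map (· + (m : Int)) := by
  have hms : (0 : Int) < ↑m := by exact_mod_cast hm
  rw [PySem.List.pyRange_of_pos _ _ hms, PySem.List.pyRange_of_pos _ _ hms]
  rw [if_pos (by exact_mod_cast hlen : (0 : Int) < ↑len)]
  by_cases hcase : m < len
  · rw [if_pos (by push_cast; omega : (0 : Int) < ↑len - ↑m)]
    have e1 : ((len : Int) - 0 + ↑m - 1) = ((len + m - 1 : Nat) : Int) := by push_cast; omega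
    have e2 : ((len : Int) - ↑m - 0 + ↑m - 1) = ((len - 1 : Nat) : Int) := by push_cast; omega
    rw [e1, e2, ← Int.natCast_div, ← Int.natCast_div, Int.toNat_natCast, Int.toNat_natCast]
    have hc : (len + m - 1) / m = (len - 1) / m + 1 := by
      rw [show len + m - 1 = (len - 1) + m by omega, Nat.add_div_right _ (by omega)]
    rw [hc, List.range_succ_eq_map]
    simp only [List.map_cons, List.map_map]
    refine congrArg₂ List.cons (by simp) ?_
    refine List.map_congr_left (fun k _ => ?_)
    simp only [Function.comp]
    push_cast
    ring
  · rw [if_neg (by push_cast; omega : ¬ (0 : Int) < ↑len - ↑m)]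
    have e1 : ((len : Int) - 0 + ↑m - 1) = ((len + m - 1 : Nat) : Int) := by push_cast; omega
    rw [e1, ← Int.natCast_div, Int.toNat_natCast]
    have hc : (len + m - 1) / m = 1 := by
      apply Nat.div_eq_of_lt_le <;> omega
    rw [hc]
    simp

lemma pvChunk_zero (ws : List String) (m : Nat) :
    PySem.List.slice ws (some 0) (some (0 + ↑m)) = ws.take m := by
  simpa using PySem.List.slice_natCast_add ws 0 m

lemma pvPiece_shift (ws : List String) (m : Nat) (j : Nat) :
    pvPiece ws ↑m (↑j + ↑m) = pvPiece (ws.drop m) ↑m ↑j := by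
  rw [show ((j : Int) + ↑m) = ((m + j : Nat) : Int) by push_cast; ring]
  have h1 := PySem.List.slice_natCast_add ws (m + j) m
  have h2 : PySem.List.slice (ws.drop m) (some (j : Int)) (some ((j : Int) + ↑m))
      = ((ws.drop m).drop j).take m := PySem.List.slice_natCast_add (ws.drop m) j m
  simp only [pvPiece, h1, h2, List.drop_drop]

lemma pvStr_shuffle (a x : String) :
    a ++ " " ++ ("\n" ++ " " ++ x) = a ++ " \n" ++ " " ++ x := by
  have hsp : (" " : String) ++ "\n" = " \n" := by decide
  simp only [String.append_assoc]
  rw [show (" " : String) ++ ("\n" ++ (" " ++ x)) = " \n" ++ (" " ++ x) by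
    rw [← String.append_assoc, hsp]]

lemma pvMain (m : Nat) (hm : 1 ≤ m) : ∀ (L : Nat) (ws : List String), ws.length = L →
    PySem.Str.join " " ((PySem.List.enumerate ws).flatMap (pvTokFn ↑m))
      = PySem.Str.join " " ((PySem.List.pyRange 0 (↑ws.length) ↑m).map (pvPiece ws ↑m)) := by
  intro L
  induction L using Nat.strong_induction_on with
  | _ L IH =>
  intro ws hL
  have hm' : (0 : Int) < ↑m := by exact_mod_cast hm
  rcases eq_or_ne ws [] with hnil | hnil
  · subst hnil
    simp [PySem.List.enumerate_nil, pvRange_nil 0 0 ↑m hm' le_rfl]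
  have hlen1 : 0 < ws.length := List.length_pos_iff.mpr hnil
  by_cases hcase : ws.length ≤ m
  · -- a single (possibly partial) chunk
    have htok := pvTok_chunk m hm ws 0 (by omega)
    rw [show ((0 : Nat) : Int) = (0 : Int) by simp] at htok
    rw [htok, pvRange_chunk m ws.length hm (by omega),
        pvRange_nil 0 (↑ws.length - ↑m) ↑m hm' (by push_cast; omega)]
    simp only [List.map_nil, List.map_cons]
    rw [pvJoin_singleton]
    have hchunk : PySem.List.slice ws (some 0) (some (0 + ↑m)) = ws := by
      rw [pvChunk_zero, List.take_of_length_le hcase]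
    simp only [pvPiece, hchunk]
    by_cases hfull : ws.length = m
    · rw [if_pos (show ws ≠ [] ∧ 0 + ws.length = m from ⟨hnil, by omega⟩),
          if_pos (show (((ws.length : Nat) : Int) == (m : Int)) = true by simp [hfull])]
      rw [pvJoin_append " " ws ["\n"] hnil (by simp), pvJoin_singleton]
      rw [String.append_assoc]
      congr 1
    · rw [if_neg (show ¬ (ws ≠ [] ∧ 0 + ws.length = m) from fun hc => hfull (by omega)),
          if_neg (show ¬ (((ws.length : Nat) : Int) == (m : Int)) = true by
            simp only [beq_iff_eq]; exact_mod_cast hfull)]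
      simp
  · -- head chunk is full; recurse on the dropped tail
    have hdrop_ne : ws.drop m ≠ [] := by
      intro hc
      have hlc : (ws.drop m).length = ws.length - m := List.length_drop
      rw [hc] at hlc
      simp at hlc
      omega
    have htake_ne : ws.take m ≠ [] := by
      intro hc
      have hlc : (ws.take m).length = min m ws.length := List.length_take
      rw [hc] at hlc
      simp at hlc
      omega
    have htake_len : (ws.take m).length = m := by simp; omega
    have hL1 : (PySem.List.enumerate ws).flatMap (pvTokFn ↑m)
        = ws.take m ++ "\n" :: (PySem.List.enumerate (ws.drop m)).flatMap (pvTokFn ↑m) := by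
      conv_lhs => rw [← List.take_append_drop m ws]
      rw [PySem.List.enumerate_append, List.flatMap_append,
          show ((0 : Int) + ↑(ws.take m).length) = (0 : Int) + ↑m by rw [htake_len],
          pvTok_shift m (ws.drop m) 0]
      have h0 := pvTok_chunk m hm (ws.take m) 0 (by omega)
      rw [show ((0 : Nat) : Int) = (0 : Int) by simp] at h0
      rw [h0, if_pos ⟨htake_ne, by omega⟩]
      simp [List.append_assoc]
    rw [hL1, pvRange_chunk m ws.length hm (by omega)]
    simp only [List.map_cons, List.map_map]
    have htail : ((PySem.List.pyRange 0 (↑ws.length - ↑m) ↑m).map (pvPiece ws ↑m ∘ (· + (m : Int))))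
        = (PySem.List.pyRange 0 (↑(ws.drop m).length) ↑m).map (pvPiece (ws.drop m) ↑m) := by
      rw [show ((ws.length : Int) - ↑m) = ((ws.drop m).length : Int) by simp; push_cast; omega]
      refine List.map_congr_left (fun i hi => ?_)
      obtain ⟨h0i, _, _⟩ := (PySem.List.mem_pyRange_iff_of_pos hm' i).mp hi
      have hj : i = ((i.toNat : Nat) : Int) := (Int.toNat_of_nonneg h0i).symm
      rw [Function.comp_apply, hj]
      exact pvPiece_shift ws m i.toNat
    rw [htail]
    have hp0 : pvPiece ws ↑m 0 = PySem.Str.join " " (ws.take m) ++ " \n" := by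
      simp only [pvPiece, pvChunk_zero]
      rw [if_pos (by simp [htake_len])]
    have htail_ne : (PySem.List.pyRange 0 (↑(ws.drop m).length) ↑m).map (pvPiece (ws.drop m) ↑m) ≠ [] := by
      rw [show ((ws.drop m).length : Int) = ((ws.length - m : Nat) : Int) by simp,
          pvRange_chunk m (ws.length - m) hm (by omega)]
      simp
    rw [pvJoin_append " " (ws.take m) _ htake_ne (by simp),
        pvJoin_cons " " "\n" _ (pvTok_ne_nil ↑m (ws.drop m) hdrop_ne 0),
        pvJoin_cons " " (pvPiece ws ↑m 0) _ htail_ne,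
        IH (ws.length - m) (by omega) (ws.drop m) (by simp), hp0]
    exact pvStr_shuffle _ _

-- ===== VERDICT (by name: the statement is the Claim_ definition above) =====
theorem append_and_after_every_2_spec : Claim_equal_append_and_after_every_2 := by
  intro text n _ hpre
  unfold Spec_append_and_after_every_2
  rw [pvA_eq, pvB_eq]
  rcases (hpre : 1 ≤ n ∨ (n ≠ 0 ∧ PySem.Str.split₀ text = [])) with hp | ⟨hn0, hsp⟩
  · have hn : n = ((n.toNat : Nat) : Int) := (Int.toNat_of_nonneg (by omega)).symm
    rw [hn]
    exact pvMain n.toNat (by omega) (PySem.Str.split₀ text).length (PySem.Str.split₀ text) rfl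
  · rw [hsp]
    simp [PySem.List.enumerate_nil, pvRange_empty n hn0]
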